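-- pv_equiv track=rewrite | github.com/Alejanro0309/Algoritmo | Ejercicio_PC_3_Ignoto_Marcano.py | invertir
-- ===== SOURCE A (Python) =====
-- def invertir(palabra, cond):
--     salida =''
--     for i in range(len(palabra)):
--         if palabra[i] == cond:
--             salida = salida[::-1]
--         else:
--             salida += palabra[i]
--     return  salida
-- ===== SOURCE B (Python) =====
-- def invertir(palabra, cond):
--     # Deque-style: keep two stacks and a direction flag; toggle the flag
--     # at each separator instead of reversing the accumulator.
--     front = []   # left part of the current text, stored reversed
--     back = []    # right part of the current text, in order
--     rev = False  # True: the logical text is the reverse of deque(front,back)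
--     for ch in palabra:
--         if ch == cond:
--             rev = not rev
--         elif rev:
--             front.append(ch)
--         else:
--             back.append(ch)
--     if rev:
--         return ''.join(back[::-1]) + ''.join(front)
--     return ''.join(front[::-1]) + ''.join(back)
-- ===== Notes on version B (the rewrite author's own statement) =====
-- stated objective: alternative
-- what changed: Instead of reversing the whole accumulator at every separator and copying it at every append, B keeps a two-stack deque plus a direction flag, toggles the flag on separators and pushes each character to the appropriate end, doing one final reversal.
import Mathlib
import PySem

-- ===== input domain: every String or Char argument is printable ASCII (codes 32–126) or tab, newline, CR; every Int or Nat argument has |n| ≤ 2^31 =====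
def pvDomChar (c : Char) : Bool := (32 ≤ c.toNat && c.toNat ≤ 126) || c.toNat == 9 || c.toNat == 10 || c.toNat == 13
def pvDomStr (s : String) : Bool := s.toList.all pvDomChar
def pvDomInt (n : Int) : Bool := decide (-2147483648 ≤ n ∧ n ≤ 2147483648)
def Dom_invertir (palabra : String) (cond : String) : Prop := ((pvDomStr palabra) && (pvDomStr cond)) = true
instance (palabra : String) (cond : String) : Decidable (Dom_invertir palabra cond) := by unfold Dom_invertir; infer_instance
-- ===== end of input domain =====

-- B replaces A's reverse-the-accumulator-at-each-separator loop by a two-stack deque with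
-- a direction flag toggled at separators (no repeated reversals); same return value.

-- ===== PORT A =====
-- salida accumulated as List Char; 'salida[::-1]' is List.reverse, 'salida += palabra[i]' is '++ [c]'
def invertir (palabra : String) (cond : String) : String :=
  String.mk (palabra.toList.foldl
    (fun salida c => if String.mk [c] = cond then salida.reverse else salida ++ [c])
    ([] : List Char))

-- ===== PORT B =====
-- state = (front, back, rev): front/back the two stacks (python lists, append = '++ [c]'), rev the flag
def invertir_alt (palabra : String) (cond : String) : String :=
  let s := palabra.toList.foldl
    (fun (st : List Char × List Char × Bool) c =>
      if String.mk [c] = cond then (st.1, st.2.1, !st.2.2)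
      else if st.2.2 then (st.1 ++ [c], st.2.1, st.2.2)
      else (st.1, st.2.1 ++ [c], st.2.2))
    (([] : List Char), ([] : List Char), false)
  if s.2.2 then String.mk (s.2.1.reverse ++ s.1) else String.mk (s.1.reverse ++ s.2.1)

-- ===== PRECONDITION & SPEC =====
def Spec_invertir (palabra : String) (cond : String) (out : String) : Prop := out = invertir_alt palabra cond
instance (palabra : String) (cond : String) (out : String) : Decidable (Spec_invertir palabra cond out) := by unfold Spec_invertir; infer_instance

-- ===== CLAIM (what is proved, stated in full; the proofs are below) =====
def Claim_equal_invertir : Prop := ∀ (palabra : String) (cond : String), Dom_invertir palabra cond → Spec_invertir palabra cond (invertir palabra cond)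

-- ===== LEMMAS AND PROOFS =====

-- Loop invariant: A's accumulator equals the text represented by B's state
-- (front reversed ++ back, the whole thing reversed when the flag is set).
theorem invertir_loop (cond : String) (l : List Char) :
    ∀ (f b : List Char) (r : Bool),
    l.foldl (fun salida c => if String.mk [c] = cond then salida.reverse else salida ++ [c])
      (if r then b.reverse ++ f else f.reverse ++ b)
    = (let s := l.foldl
        (fun (st : List Char × List Char × Bool) c =>
          if String.mk [c] = cond then (st.1, st.2.1, !st.2.2)
          else if st.2.2 then (st.1 ++ [c], st.2.1, st.2.2)
          else (st.1, st.2.1 ++ [c], st.2.2)) (f, b, r);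
       if s.2.2 then s.2.1.reverse ++ s.1 else s.1.reverse ++ s.2.1) := by
  induction l with
  | nil => intro f b r; cases r <;> simp
  | cons c l ih =>
    intro f b r
    by_cases h : String.mk [c] = cond
    · cases r
      · simpa [h] using ih f b true
      · simpa [h] using ih f b false
    · cases r
      · simpa [h, List.append_assoc] using ih f (b ++ [c]) false
      · simpa [h, List.append_assoc] using ih (f ++ [c]) b true

-- ===== VERDICT (by name: the statement is the Claim_ definition above) =====
theorem invertir_spec : Claim_equal_invertir := by
  intro palabra cond _
  show invertir palabra cond = invertir_alt palabra cond
  have h := invertir_loop cond palabra.toList [] [] false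
  simp only [List.reverse_nil, List.append_nil, ite_self] at h
  unfold invertir invertir_alt
  rw [h, apply_ite String.mk]
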